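-- pv_equiv track=rewrite | github.com/keef75/CoCo | cocoa_audio.py | _generate_composition_tags
-- ===== SOURCE A (Python) =====
-- def _generate_composition_tags(prompt: str) -> str:
--     """Generate tags for musical composition based on prompt analysis"""
--     tags = []
--     prompt_lower = prompt.lower()
--
--     # Genre tags
--     if any(word in prompt_lower for word in ["electronic", "synth", "digital"]):
--         tags.append("electronic")
--     if any(word in prompt_lower for word in ["orchestral", "classical", "symphony"]):
--         tags.append("orchestral")
--     if any(word in prompt_lower for word in ["jazz", "swing", "blues"]):
--         tags.append("jazz")
--     if any(word in prompt_lower for word in ["rock", "metal", "guitar"]):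
--         tags.append("rock")
--     if any(word in prompt_lower for word in ["ambient", "atmospheric", "soundscape"]):
--         tags.append("ambient")
--
--     # Emotion tags
--     if any(word in prompt_lower for word in ["energetic", "fast", "upbeat"]):
--         tags.append("energetic")
--     if any(word in prompt_lower for word in ["calm", "slow", "peaceful"]):
--         tags.append("calm")
--     if any(word in prompt_lower for word in ["dramatic", "epic", "cinematic"]):
--         tags.append("cinematic")
--
--     # Add COCO consciousness tag
--     tags.append("coco_generated")
--     tags.append("elevenlabs")
--
--     return ", ".join(tags[:8])  # Limit to 8 most relevant tags
-- ===== SOURCE B (Python) =====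
-- # B: single left-to-right scan of the lowercased prompt; at each position the
-- # keyword->tag map is consulted for keywords starting there (no per-keyword
-- # substring search), collecting matched tags in a set, then emitted in
-- # canonical tag order.
-- _KEYWORD_TAG = [
--     ("electronic", "electronic"), ("synth", "electronic"), ("digital", "electronic"),
--     ("orchestral", "orchestral"), ("classical", "orchestral"), ("symphony", "orchestral"),
--     ("jazz", "jazz"), ("swing", "jazz"), ("blues", "jazz"),
--     ("rock", "rock"), ("metal", "rock"), ("guitar", "rock"),
--     ("ambient", "ambient"), ("atmospheric", "ambient"), ("soundscape", "ambient"),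
--     ("energetic", "energetic"), ("fast", "energetic"), ("upbeat", "energetic"),
--     ("calm", "calm"), ("slow", "calm"), ("peaceful", "calm"),
--     ("dramatic", "cinematic"), ("epic", "cinematic"), ("cinematic", "cinematic"),
-- ]
-- _TAG_ORDER = ["electronic", "orchestral", "jazz", "rock", "ambient",
--               "energetic", "calm", "cinematic"]
--
-- def _generate_composition_tags(prompt: str) -> str:
--     text = prompt.lower()
--     found = set()
--     for i in range(len(text)):
--         for kw, tag in _KEYWORD_TAG:
--             if tag not in found and text.startswith(kw, i):
--                 found.add(tag)
--     tags = [t for t in _TAG_ORDER if t in found]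
--     tags += ["coco_generated", "elevenlabs"]
--     return ", ".join(tags[:8])
-- ===== Notes on version B (the rewrite author's own statement) =====
-- stated objective: alternative
-- what changed: Instead of running eight independent keyword substring searches over the prompt, B makes a single left-to-right scan over the lowercased prompt, testing at each position which keywords of a keyword-to-tag map start there and accumulating the matched tags in a set, then emits the tags in canonical order; it trades speed for a uniform text-scan formulation.
import Mathlib
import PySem

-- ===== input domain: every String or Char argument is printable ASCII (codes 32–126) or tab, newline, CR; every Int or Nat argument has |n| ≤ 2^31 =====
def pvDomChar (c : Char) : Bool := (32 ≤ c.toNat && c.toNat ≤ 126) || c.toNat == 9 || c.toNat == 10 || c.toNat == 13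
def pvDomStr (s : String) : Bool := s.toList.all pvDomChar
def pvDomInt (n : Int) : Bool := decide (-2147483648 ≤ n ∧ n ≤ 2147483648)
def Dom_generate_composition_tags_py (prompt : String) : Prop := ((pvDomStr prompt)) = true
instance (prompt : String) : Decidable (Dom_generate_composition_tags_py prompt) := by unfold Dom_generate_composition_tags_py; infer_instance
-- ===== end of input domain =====

-- B replaces A's eight independent keyword substring searches by one left-to-right scan of
-- the lowercased prompt against a keyword→tag map, collecting matched tags in a set and
-- emitting them in canonical order (objective: alternative; not faster).


-- ===== PORT A =====
def generate_composition_tags_py (prompt : String) : String :=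
  let tags : List String := []
  let prompt_lower := PySem.Str.lower prompt
  let tags := if ["electronic", "synth", "digital"].any (fun w => PySem.Str.isIn w prompt_lower) then tags ++ ["electronic"] else tags
  let tags := if ["orchestral", "classical", "symphony"].any (fun w => PySem.Str.isIn w prompt_lower) then tags ++ ["orchestral"] else tags
  let tags := if ["jazz", "swing", "blues"].any (fun w => PySem.Str.isIn w prompt_lower) then tags ++ ["jazz"] else tags
  let tags := if ["rock", "metal", "guitar"].any (fun w => PySem.Str.isIn w prompt_lower) then tags ++ ["rock"] else tags
  let tags := if ["ambient", "atmospheric", "soundscape"].any (fun w => PySem.Str.isIn w prompt_lower) then tags ++ ["ambient"] else tags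
  let tags := if ["energetic", "fast", "upbeat"].any (fun w => PySem.Str.isIn w prompt_lower) then tags ++ ["energetic"] else tags
  let tags := if ["calm", "slow", "peaceful"].any (fun w => PySem.Str.isIn w prompt_lower) then tags ++ ["calm"] else tags
  let tags := if ["dramatic", "epic", "cinematic"].any (fun w => PySem.Str.isIn w prompt_lower) then tags ++ ["cinematic"] else tags
  let tags := tags ++ ["coco_generated"]
  let tags := tags ++ ["elevenlabs"]
  PySem.Str.join ", " (tags.take 8)

-- ===== PORT B =====
def pvKeywordTag : List (String × String) :=
  [("electronic", "electronic"), ("synth", "electronic"), ("digital", "electronic"),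
   ("orchestral", "orchestral"), ("classical", "orchestral"), ("symphony", "orchestral"),
   ("jazz", "jazz"), ("swing", "jazz"), ("blues", "jazz"),
   ("rock", "rock"), ("metal", "rock"), ("guitar", "rock"),
   ("ambient", "ambient"), ("atmospheric", "ambient"), ("soundscape", "ambient"),
   ("energetic", "energetic"), ("fast", "energetic"), ("upbeat", "energetic"),
   ("calm", "calm"), ("slow", "calm"), ("peaceful", "calm"),
   ("dramatic", "cinematic"), ("epic", "cinematic"), ("cinematic", "cinematic")]

def pvTagOrder : List String :=
  ["electronic", "orchestral", "jazz", "rock", "ambient", "energetic", "calm", "cinematic"]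

-- text.startswith(kw, i) with 0 ≤ i < len(text) is exactly Chars.startswith on (toList.drop i);
-- range(len(text)) is List.range over the length (all indices nonnegative).
def generate_composition_tags_py_alt (prompt : String) : String :=
  let cs := (PySem.Str.lower prompt).toList
  let found : PySem.Set String :=
    (List.range cs.length).foldl (fun found i =>
      pvKeywordTag.foldl (fun found p =>
        if !(PySem.Set.contains found p.2) && PySem.Chars.startswith (cs.drop i) p.1.toList
        then PySem.Set.add found p.2 else found) found) PySem.Set.empty
  let tags := pvTagOrder.filter (fun t => PySem.Set.contains found t)
  let tags := tags ++ ["coco_generated", "elevenlabs"]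
  PySem.Str.join ", " (tags.take 8)

-- ===== PRECONDITION & SPEC =====
def Spec_generate_composition_tags_py (prompt : String) (out : String) : Prop := out = generate_composition_tags_py_alt prompt
instance (prompt : String) (out : String) : Decidable (Spec_generate_composition_tags_py prompt out) := by unfold Spec_generate_composition_tags_py; infer_instance

-- ===== CLAIM (what is proved, stated in full; the proofs are below) =====
def Claim_equal_generate_composition_tags_py : Prop := ∀ (prompt : String), Dom_generate_composition_tags_py prompt → Spec_generate_composition_tags_py prompt (generate_composition_tags_py prompt)

-- ===== LEMMAS AND PROOFS =====

lemma pv_contains_add (s : PySem.Set String) (x t : String) :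
    PySem.Set.contains (PySem.Set.add s x) t = (PySem.Set.contains s t || x == t) := by
  unfold PySem.Set.add
  by_cases hc : PySem.Set.contains s x
  · rw [if_pos hc]
    by_cases ht : x = t
    · subst ht
      simp [PySem.Set.contains] at hc ⊢
      simp [hc]
    · simp [PySem.Set.contains, ht]
  · rw [if_neg hc]
    by_cases ht : x = t
    · subst ht
      simp [PySem.Set.contains]
    · simp [PySem.Set.contains, ht, Ne.symm ht]

-- membership in a set built by conditionally adding tags from a pair list
lemma pv_contains_inner (l : List (String × String)) (s : PySem.Set String)
    (q : String → Bool) (t : String) :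
    PySem.Set.contains (l.foldl (fun s p =>
        if !(PySem.Set.contains s p.2) && q p.1 then PySem.Set.add s p.2 else s) s) t
      = (PySem.Set.contains s t || l.any (fun p => q p.1 && p.2 == t)) := by
  induction l generalizing s with
  | nil => simp
  | cons p l ih =>
    simp only [List.foldl_cons, List.any_cons]
    by_cases hq : q p.1
    · by_cases hc : PySem.Set.contains s p.2
      · have h0 : (!(PySem.Set.contains s p.2) && q p.1) = false := by rw [hc]; simp
        rw [h0]
        simp only [Bool.false_eq_true, if_false, ih]
        simp [PySem.Set.contains] at hc
        by_cases ht : p.2 = t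
        · subst ht; simp [PySem.Set.contains, hc, hq]
        · rw [beq_eq_false_iff_ne.mpr ht]; simp [hq]
      · rw [Bool.not_eq_true] at hc
        have h0 : (!(PySem.Set.contains s p.2) && q p.1) = true := by rw [hc, hq]; rfl
        rw [h0]
        simp only [if_true, ih, pv_contains_add]
        simp [hq, Bool.or_assoc]
    · rw [Bool.not_eq_true] at hq
      have h0 : (!(PySem.Set.contains s p.2) && q p.1) = false := by rw [hq]; simp
      rw [h0]
      simp only [Bool.false_eq_true, if_false, ih]
      simp [hq]

lemma pv_contains_inner' (cs : List Char) (i : Nat) (l : List (String × String))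
    (s : PySem.Set String) (t : String) :
    PySem.Set.contains (l.foldl (fun s p =>
        if !(PySem.Set.contains s p.2) && PySem.Chars.startswith (cs.drop i) p.1.toList
        then PySem.Set.add s p.2 else s) s) t
      = (PySem.Set.contains s t ||
         l.any (fun p => PySem.Chars.startswith (cs.drop i) p.1.toList && p.2 == t)) :=
  pv_contains_inner l s (fun kw => PySem.Chars.startswith (cs.drop i) kw.toList) t

lemma pv_contains_outer (idx : List Nat) (s : PySem.Set String) (cs : List Char) (t : String) :
    PySem.Set.contains (idx.foldl (fun s i =>
        pvKeywordTag.foldl (fun s p =>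
          if !(PySem.Set.contains s p.2) && PySem.Chars.startswith (cs.drop i) p.1.toList
          then PySem.Set.add s p.2 else s) s) s) t
      = (PySem.Set.contains s t ||
         idx.any (fun i => pvKeywordTag.any
           (fun p => PySem.Chars.startswith (cs.drop i) p.1.toList && p.2 == t))) := by
  induction idx generalizing s with
  | nil => simp
  | cons i idx ih =>
    simp only [List.foldl_cons, List.any_cons]
    rw [ih, pv_contains_inner', Bool.or_assoc]

lemma pv_range_any_startswith (cs : List Char) (kw : List Char) (hkw : kw ≠ []) :
    (List.range cs.length).any (fun i => PySem.Chars.startswith (cs.drop i) kw)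
      = PySem.Chars.isIn kw cs := by
  rw [Bool.eq_iff_iff, ← PySem.Chars.exists_prefix_drop_iff_isIn]
  simp only [List.any_eq_true, List.mem_range, PySem.Chars.startswith_iff]
  constructor
  · rintro ⟨i, _, h⟩; exact ⟨i, h⟩
  · rintro ⟨j, hj⟩
    by_cases hlt : j < cs.length
    · exact ⟨j, hlt, hj⟩
    · exfalso
      rw [List.drop_eq_nil_of_le (le_of_not_gt hlt), List.prefix_nil] at hj
      exact hkw hj

lemma pv_any_swap (idx : List Nat) (cs : List Char) (t : String) :
    idx.any (fun i => pvKeywordTag.any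
        (fun p => PySem.Chars.startswith (cs.drop i) p.1.toList && p.2 == t))
      = pvKeywordTag.any (fun p =>
          idx.any (fun i => PySem.Chars.startswith (cs.drop i) p.1.toList) && p.2 == t) := by
  rw [Bool.eq_iff_iff]
  simp only [List.any_eq_true, Bool.and_eq_true]
  constructor
  · rintro ⟨i, hi, p, hp, hs, ht⟩; exact ⟨p, hp, ⟨i, hi, hs⟩, ht⟩
  · rintro ⟨p, hp, ⟨i, hi, hs⟩, ht⟩; exact ⟨i, hi, p, hp, hs, ht⟩

lemma pv_any_congr {α : Type} (l : List α) (f g : α → Bool)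
    (h : ∀ x ∈ l, f x = g x) : l.any f = l.any g := by
  induction l with
  | nil => rfl
  | cons x l ih =>
    simp only [List.any_cons, h x (List.mem_cons_self), ih (fun y hy => h y (List.mem_cons_of_mem x hy))]

-- final membership condition for each tag: some keyword of the tag occurs in the text
lemma pv_contains_final (cs : List Char) (t : String) :
    PySem.Set.contains ((List.range cs.length).foldl (fun s i =>
        pvKeywordTag.foldl (fun s p =>
          if !(PySem.Set.contains s p.2) && PySem.Chars.startswith (cs.drop i) p.1.toList
          then PySem.Set.add s p.2 else s) s) PySem.Set.empty) t
      = pvKeywordTag.any (fun p => PySem.Chars.isIn p.1.toList cs && p.2 == t) := by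
  rw [pv_contains_outer, pv_any_swap]
  
  have hempty : PySem.Set.contains (PySem.Set.empty (α := String)) t = false := by
    simp [PySem.Set.empty, PySem.Set.contains]
  rw [hempty, Bool.false_or]
  apply pv_any_congr
  intro p hp
  have h : (List.range cs.length).any (fun i => PySem.Chars.startswith (cs.drop i) p.1.toList)
      = PySem.Chars.isIn p.1.toList cs := by
    apply pv_range_any_startswith
    fin_cases hp <;> decide
  rw [h]

lemma pv_b_tags (cs : List Char) :
    pvTagOrder.filter (fun t => PySem.Set.contains ((List.range cs.length).foldl (fun s i =>
        pvKeywordTag.foldl (fun s p =>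
          if !(PySem.Set.contains s p.2) && PySem.Chars.startswith (cs.drop i) p.1.toList
          then PySem.Set.add s p.2 else s) s) PySem.Set.empty) t)
      = pvTagOrder.filter (fun t =>
          pvKeywordTag.any (fun p => PySem.Chars.isIn p.1.toList cs && p.2 == t)) := by
  apply List.filter_congr
  intro t _
  rw [pv_contains_final]

set_option maxHeartbeats 1000000 in
-- ===== VERDICT (by name: the statement is the Claim_ definition above) =====
theorem generate_composition_tags_py_spec : Claim_equal_generate_composition_tags_py := by
  intro prompt _
  unfold Spec_generate_composition_tags_py generate_composition_tags_py generate_composition_tags_py_alt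
  dsimp only
  rw [pv_b_tags]
  have h2 : ∀ (p : String → Bool) (x : String) (xs : List String),
      List.filter p (x :: xs) = (if p x = true then [x] else []) ++ List.filter p xs := by
    intro p x xs; by_cases h : p x <;> simp [h]
  have h1 : ∀ (c : Prop) [Decidable c] (tags : List String) (x : String),
      (if c then tags ++ [x] else tags) = tags ++ (if c then [x] else []) := by
    intro c _ tags x; split_ifs <;> simp
  simp only [pvTagOrder, h2, List.filter_nil]
  simp only [h1, List.append_assoc, List.nil_append, List.append_nil, List.cons_append]
  simp only [pvKeywordTag, List.any_cons, List.any_nil, PySem.Str.isIn_eq,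
    PySem.Str.toList_lower]
  simp only [beq_self_eq_true, Bool.and_true, Bool.or_false, Bool.false_or, Bool.and_false,
    String.reduceBEq]
  split_ifs <;> rfl
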